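-- pv_equiv track=rewrite | github.com/Bobo-BKL/BookCoding-This_is_coding_test | 추가_네이버 코딩테스트/실전1.py | solution
-- ===== SOURCE A (Python) =====
-- def solution(A):
--     n = len(A)
--     dp = [1] * n
--
--     max_val = 1
--     for i in range(1, n):
--         if A[i - 1] < A[i]:
--             dp[i] += dp[i - 1]
--             if max_val < dp[i]:
--                 max_val = dp[i]
--
--     for idx, val in enumerate(dp):
--         if val == max_val:
--             return idx - val + 1
-- ===== SOURCE B (Python) =====
-- def solution(A):
--     n = len(A)
--     if n == 0:
--         return None
--     cur = 1
--     best = 1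
--     best_start = 0
--     for i in range(1, n):
--         if A[i - 1] < A[i]:
--             cur += 1
--             if cur > best:
--                 best = cur
--                 best_start = i - cur + 1
--         else:
--             cur = 1
--     return best_start
-- ===== Notes on version B (the rewrite author's own statement) =====
-- stated objective: simpler
-- what changed: Replaced A's dp table of run lengths plus a separate max tracker and a second enumerate scan by a single pass that keeps only (current run length, best length, best start), returning best_start directly.
-- outside the precondition, e.g. on solution([]): A returns None, B returns None
import Mathlib
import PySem

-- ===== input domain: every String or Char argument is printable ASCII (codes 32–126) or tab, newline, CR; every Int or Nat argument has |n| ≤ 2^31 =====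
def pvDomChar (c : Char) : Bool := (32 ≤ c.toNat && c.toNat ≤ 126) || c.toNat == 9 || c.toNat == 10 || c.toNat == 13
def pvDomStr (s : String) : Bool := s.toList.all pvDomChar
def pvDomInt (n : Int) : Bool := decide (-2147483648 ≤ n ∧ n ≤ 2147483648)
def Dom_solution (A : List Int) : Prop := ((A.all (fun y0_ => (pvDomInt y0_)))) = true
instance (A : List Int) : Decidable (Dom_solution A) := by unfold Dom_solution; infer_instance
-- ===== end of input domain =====

-- B replaces A's dp-table + max + second scan by one linear pass keeping (current run length, best length, best start): simpler, one pass.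

-- ===== PORT A =====
-- loop body of A's first for-loop; indices produced by range(1, n) are always in [1, n), so pyGetD's default is never read, and i.toNat = i
def stepA (A : List Int) (st : List Int × Int) (i : Int) : List Int × Int :=
  if PySem.List.pyGetD A (i - 1) 0 < PySem.List.pyGetD A i 0 then
    let v := PySem.List.pyGetD st.1 i 0 + PySem.List.pyGetD st.1 (i - 1) 0
    let dp := st.1.set i.toNat v
    if st.2 < v then (dp, v) else (dp, st.2)
  else st

def solution (A : List Int) : Int :=
  let n := A.length
  let st := (PySem.List.pyRange 1 (n : Int) 1).foldl (stepA A) (List.replicate n 1, 1)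
  match (PySem.List.enumerate st.1 0).find? (fun p => p.2 == st.2) with
  | some (idx, val) => idx - val + 1
  | none => 0  -- Python falls off the loop (returns None) only for A = [], excluded by Pre_

-- ===== PORT B =====
-- loop body of B: state (cur, best, best_start)
def stepB (A : List Int) (st : Int × Int × Int) (i : Int) : Int × Int × Int :=
  if PySem.List.pyGetD A (i - 1) 0 < PySem.List.pyGetD A i 0 then
    let cur := st.1 + 1
    if cur > st.2.1 then (cur, cur, i - cur + 1) else (cur, st.2.1, st.2.2)
  else (1, st.2.1, st.2.2)

def solution_alt (A : List Int) : Int :=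
  -- A = [] (Python B returns None there) is excluded by Pre_
  ((PySem.List.pyRange 1 (A.length : Int) 1).foldl (stepB A) (1, 1, 0)).2.2

-- ===== PRECONDITION & SPEC =====
-- Pre_ excludes only the empty list, on which Python A (and B) return None, not an int.
def Pre_solution (A : List Int) : Prop := A ≠ []
instance (A : List Int) : Decidable (Pre_solution A) := by unfold Pre_solution; infer_instance

def pvWitness_solution : List Int := [3, 1, 2]

def Spec_solution (A : List Int) (out : Int) : Prop := out = solution_alt A
instance (A : List Int) (out : Int) : Decidable (Spec_solution A out) := by unfold Spec_solution; infer_instance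

-- ===== CLAIM (what is proved, stated in full; the proofs are below) =====
def Claim_equal_solution : Prop := ∀ (A : List Int), Dom_solution A → Pre_solution A → Spec_solution A (solution A)

-- ===== LEMMAS AND PROOFS =====

-- coupling invariant after both loops have processed i = 1 .. k-1
def RunInv (A : List Int) (k : Nat) (dp : List Int) (mv cur best bs : Int) : Prop :=
  dp.length = A.length ∧
  (∀ j : Nat, k ≤ j → j < A.length → dp.getD j 0 = 1) ∧
  cur = dp.getD (k - 1) 0 ∧
  1 ≤ cur ∧ cur ≤ (k : Int) ∧
  mv = best ∧ cur ≤ best ∧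
  (∀ j : Nat, j < A.length → dp.getD j 0 ≤ best) ∧
  0 ≤ bs ∧ bs + best ≤ (k : Int) ∧
  dp.getD (bs + best - 1).toNat 0 = best ∧
  (∀ j : Nat, (j : Int) < bs + best - 1 → dp.getD j 0 < best)

lemma getD_set_eq (l : List Int) (i : Nat) (v : Int) (h : i < l.length) :
    (l.set i v).getD i 0 = v := by
  simp [List.getD, h]

lemma getD_set_ne (l : List Int) (i j : Nat) (v : Int) (h : i ≠ j) :
    (l.set i v).getD j 0 = l.getD j 0 := by
  simp [List.getD, h]

lemma find_enum (dp : List Int) (s best : Int) (i0 : Nat) (hlen : i0 < dp.length)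
    (hhit : dp.getD i0 0 = best) (hmiss : ∀ j : Nat, j < i0 → dp.getD j 0 ≠ best) :
    (PySem.List.enumerate dp s).find? (fun p => p.2 == best) = some (s + (i0 : Int), best) := by
  induction dp generalizing s i0 with
  | nil => simp at hlen
  | cons x t ih =>
    rw [PySem.List.enumerate_cons]
    cases i0 with
    | zero =>
      simp only [List.getD_cons_zero] at hhit
      simp [hhit]
    | succ j =>
      rw [List.find?_cons_of_neg (by simpa using hmiss 0 (Nat.succ_pos j))]
      have hres := ih (s + 1) j (by simpa using hlen) (by simpa using hhit)
        (fun j' hj' => by simpa using hmiss (j' + 1) (by omega))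
      rw [hres]
      have : s + 1 + (j : Int) = s + ((j + 1 : Nat) : Int) := by push_cast; ring
      rw [this]

lemma inv_step (A : List Int) (k : Nat) (hk : 1 ≤ k) (hkn : k < A.length)
    (dp : List Int) (mv cur best bs : Int)
    (h : RunInv A k dp mv cur best bs) :
    RunInv A (k + 1) (stepA A (dp, mv) (k : Int)).1 (stepA A (dp, mv) (k : Int)).2
      (stepB A (cur, best, bs) (k : Int)).1
      (stepB A (cur, best, bs) (k : Int)).2.1
      (stepB A (cur, best, bs) (k : Int)).2.2 := by
  obtain ⟨h1, h2, h3, h4, h5, h6, h7, h8, h9, h10, h11, h12⟩ := h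
  have hbest1 : 1 ≤ best := le_trans h4 h7
  have hi0nn : 0 ≤ bs + best - 1 := by omega
  have hi0lt : bs + best - 1 < (k : Int) := by omega
  have hkc : (k : Int) - 1 = ((k - 1 : Nat) : Int) := by push_cast [hk]; ring
  have hdpk : PySem.List.pyGetD dp (k : Int) 0 = 1 := by
    rw [PySem.List.pyGetD_natCast]
    exact h2 k le_rfl (h1 ▸ hkn)
  have hdpk1 : PySem.List.pyGetD dp ((k : Int) - 1) 0 = cur := by
    rw [hkc, PySem.List.pyGetD_natCast]; exact h3.symm
  by_cases hlt : PySem.List.pyGetD A ((k : Int) - 1) 0 < PySem.List.pyGetD A (k : Int) 0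
  · -- A[k-1] < A[k]
    simp only [stepA, stepB, if_pos hlt, hdpk, hdpk1, Int.toNat_natCast, h6]
    have hv : (1 : Int) + cur = cur + 1 := by ring
    rw [hv]
    by_cases hb : cur + 1 > best
    · rw [if_pos (by exact hb), if_pos hb]
      dsimp only
      refine ⟨by simpa using h1, ?_, ?_, by omega, by push_cast; omega, rfl, le_refl _,
        ?_, by omega, by push_cast; omega, ?_, ?_⟩
      · intro j hj hjn
        rw [getD_set_ne dp k j _ (by omega)]
        exact h2 j (by omega) hjn
      · have : k + 1 - 1 = k := by omega
        rw [this, getD_set_eq dp k _ (h1 ▸ hkn)]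
      · intro j hjn
        by_cases hjk : j = k
        · rw [hjk, getD_set_eq dp k _ (h1 ▸ hkn)]
        · rw [getD_set_ne dp k j _ (fun e => hjk e.symm)]
          exact le_trans (h8 j hjn) (by omega)
      · have harith : (k : Int) - (cur + 1) + 1 + (cur + 1) - 1 = (k : Int) := by ring
        rw [harith, Int.toNat_natCast, getD_set_eq dp k _ (h1 ▸ hkn)]
      · intro j hj
        have hjk : (j : Int) < (k : Int) := by omega
        have : j ≠ k := by exact_mod_cast Int.ne_of_lt hjk
        rw [getD_set_ne dp k j _ (fun e => this e.symm)]
        have hjn : j < A.length := by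
          have : j < k := by exact_mod_cast hjk
          omega
        exact lt_of_le_of_lt (h8 j hjn) (by omega)
    · rw [if_neg (by exact hb), if_neg hb]
      dsimp only
      have hcb : cur + 1 ≤ best := by omega
      refine ⟨by simpa using h1, ?_, ?_, by omega, by push_cast; omega, rfl, hcb,
        ?_, h9, by push_cast; omega, ?_, ?_⟩
      · intro j hj hjn
        rw [getD_set_ne dp k j _ (by omega)]
        exact h2 j (by omega) hjn
      · have : k + 1 - 1 = k := by omega
        rw [this, getD_set_eq dp k _ (h1 ▸ hkn)]
      · intro j hjn
        by_cases hjk : j = k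
        · rw [hjk, getD_set_eq dp k _ (h1 ▸ hkn)]; exact hcb
        · rw [getD_set_ne dp k j _ (fun e => hjk e.symm)]
          exact h8 j hjn
      · have hne : (bs + best - 1).toNat ≠ k := by omega
        rw [getD_set_ne dp k _ _ (fun e => hne e.symm)]
        exact h11
      · intro j hj
        have hjk : j ≠ k := by omega
        rw [getD_set_ne dp k j _ (fun e => hjk e.symm)]
        exact h12 j hj
  · -- not A[k-1] < A[k]
    simp only [stepA, stepB, if_neg hlt]
    refine ⟨h1, ?_, ?_, le_refl _, by push_cast; omega, h6, hbest1,
      h8, h9, by push_cast; omega, h11, h12⟩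
    · intro j hj hjn
      exact h2 j (by omega) hjn
    · have : k + 1 - 1 = k := by omega
      rw [this]
      exact (h2 k le_rfl (h1 ▸ hkn)).symm

lemma inv_loop (A : List Int) (k : Nat) (hk : 1 ≤ k) (hkn : k ≤ A.length) :
    RunInv A k
      ((PySem.List.pyRange 1 (k : Int) 1).foldl (stepA A) (List.replicate A.length 1, 1)).1
      ((PySem.List.pyRange 1 (k : Int) 1).foldl (stepA A) (List.replicate A.length 1, 1)).2
      ((PySem.List.pyRange 1 (k : Int) 1).foldl (stepB A) (1, 1, 0)).1
      ((PySem.List.pyRange 1 (k : Int) 1).foldl (stepB A) (1, 1, 0)).2.1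
      ((PySem.List.pyRange 1 (k : Int) 1).foldl (stepB A) (1, 1, 0)).2.2 := by
  induction k, hk using Nat.le_induction with
  | base =>
    rw [show ((1 : Nat) : Int) = 1 by norm_num, PySem.List.pyRange_one_eq_nil le_rfl]
    simp only [List.foldl_nil]
    have h0 : 0 < A.length := hkn
    refine ⟨by simp, ?_, ?_, le_refl _, by norm_num, rfl, le_refl _, ?_, le_refl _,
      by norm_num, ?_, ?_⟩
    · intro j _ hjn; simp [List.getD, hjn]
    · simp [List.getD, h0]
    · intro j hjn; simp [List.getD, hjn]
    · simp [List.getD, h0]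
    · intro j hj; omega
  | succ k hk ih =>
    have hrw : PySem.List.pyRange 1 ((k + 1 : Nat) : Int) 1
        = PySem.List.pyRange 1 (k : Int) 1 ++ [(k : Int)] := by
      push_cast
      exact PySem.List.pyRange_one_succ_right (by exact_mod_cast hk)
    rw [hrw]
    simp only [List.foldl_append, List.foldl_cons, List.foldl_nil]
    exact inv_step A k hk (by omega) _ _ _ _ _ (ih (by omega))

-- ===== VERDICT (by name: the statement is the Claim_ definition above) =====
theorem solution_spec : Claim_equal_solution := by
  intro A _ hpre
  unfold Spec_solution solution solution_alt
  dsimp only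
  have hn : 1 ≤ A.length := by
    cases A with
    | nil => exact absurd rfl hpre
    | cons x t => simp
  obtain ⟨h1, h2, h3, h4, h5, h6, h7, h8, h9, h10, h11, h12⟩ :=
    inv_loop A A.length hn le_rfl
  set sA := (PySem.List.pyRange 1 (A.length : Int) 1).foldl (stepA A)
      (List.replicate A.length 1, 1) with hsA
  set sB := (PySem.List.pyRange 1 (A.length : Int) 1).foldl (stepB A) (1, 1, 0) with hsB
  have hbest1 : 1 ≤ sB.2.1 := le_trans h4 h7
  have hi0nn : 0 ≤ sB.2.2 + sB.2.1 - 1 := by omega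
  have hi0cast : (((sB.2.2 + sB.2.1 - 1).toNat : Int)) = sB.2.2 + sB.2.1 - 1 :=
    Int.toNat_of_nonneg hi0nn
  have hi0len : (sB.2.2 + sB.2.1 - 1).toNat < sA.1.length := by
    rw [h1]; omega
  have hfind := find_enum sA.1 0 sB.2.1 ((sB.2.2 + sB.2.1 - 1).toNat) hi0len h11
    (fun j hj => ne_of_lt (h12 j (by omega)))
  rw [h6, hfind]
  dsimp only
  omega
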